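-- pv_equiv track=rewrite | github.com/TechWizardsTechwiz6/Wavebell | sensors.py | sanitize_lcd_text
-- ===== SOURCE A (Python) =====
-- def sanitize_lcd_text(text):
--     if not text:
--         return ""
--
--     text = str(text).replace('\n', ' ').replace('\r', ' ').replace('\t', ' ')
--
--     clean_text = ""
--     for char in text:
--         if ord(char) >= 32 and ord(char) <= 126:
--             clean_text += char
--         else:
--             clean_text += " "
--
--     return clean_text.strip()
-- ===== SOURCE B (Python) =====
-- def sanitize_lcd_text(text):
--     if not text:
--         return ""
--     s = str(text)
--     n = len(s)
--     # locate the stripped region first: first/last char that survives strip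
--     # (code 33..126), then map only that window to printable ASCII.
--     i = 0
--     while i < n and not (33 <= ord(s[i]) <= 126):
--         i += 1
--     j = n
--     while j > i and not (33 <= ord(s[j - 1]) <= 126):
--         j -= 1
--     out = []
--     for c in s[i:j]:
--         out.append(c if 32 <= ord(c) <= 126 else ' ')
--     return "".join(out)
-- ===== Notes on version B (the rewrite author's own statement) =====
-- stated objective: alternative
-- what changed: Instead of A's sanitise-everything-then-strip (three replace passes, a full-string mapping loop with string concatenation, then strip), B first locates the strip boundaries by scanning from each end for a character that survives stripping (code 33-126) and then sanitises only that window, so no replace chain and no strip call at all.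
import Mathlib
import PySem

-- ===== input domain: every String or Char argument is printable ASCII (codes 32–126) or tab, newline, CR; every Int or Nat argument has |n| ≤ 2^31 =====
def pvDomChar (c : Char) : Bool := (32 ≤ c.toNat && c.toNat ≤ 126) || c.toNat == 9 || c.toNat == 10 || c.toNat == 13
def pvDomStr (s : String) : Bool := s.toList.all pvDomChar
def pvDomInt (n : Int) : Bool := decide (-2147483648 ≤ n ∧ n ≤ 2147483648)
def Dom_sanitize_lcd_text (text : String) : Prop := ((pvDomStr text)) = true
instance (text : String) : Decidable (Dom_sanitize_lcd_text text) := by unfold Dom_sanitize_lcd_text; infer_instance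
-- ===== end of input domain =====

-- B locates the stripped window first (scan from each end for a surviving char, codes 33..126) and maps only that window, instead of A's replace-chain + full map + strip (alternative decomposition, same result on the stated domain).


-- ===== PORT A =====
def sanitize_lcd_text (text : String) : String :=
  if text = "" then ""
  else
    let t := PySem.Str.replace (PySem.Str.replace (PySem.Str.replace text "\n" " ") "\r" " ") "\t" " "
    let clean : List Char :=
      t.toList.foldl (fun acc c => if 32 ≤ c.toNat ∧ c.toNat ≤ 126 then acc ++ [c] else acc ++ [' ']) []
    PySem.Str.strip (String.ofList clean)

-- ===== PORT B =====
-- a char that survives Python's strip after sanitising: printable non-space, codes 33..126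
def pvKeep (c : Char) : Bool := 33 ≤ c.toNat && c.toNat ≤ 126
def sanitize_lcd_text_alt (text : String) : String :=
  if text = "" then ""
  else
    let s := text.toList
    -- 'while i < n and not keep(s[i]): i += 1' — advance past non-keepable chars from the front
    let t := s.dropWhile (fun c => !pvKeep c)
    -- 'while j > i and not keep(s[j-1]): j -= 1' — retreat past non-keepable chars from the back
    let core := (t.reverse.dropWhile (fun c => !pvKeep c)).reverse
    -- map the window s[i:j] to printable ASCII
    String.ofList (core.map (fun c => if 32 ≤ c.toNat ∧ c.toNat ≤ 126 then c else ' '))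

-- ===== PRECONDITION & SPEC =====
def Spec_sanitize_lcd_text (text : String) (out : String) : Prop := out = sanitize_lcd_text_alt text
instance (text : String) (out : String) : Decidable (Spec_sanitize_lcd_text text out) := by unfold Spec_sanitize_lcd_text; infer_instance

-- ===== CLAIM (what is proved, stated in full; the proofs are below) =====
def Claim_equal_sanitize_lcd_text : Prop := ∀ (text : String), Dom_sanitize_lcd_text text → Spec_sanitize_lcd_text text (sanitize_lcd_text text)

-- ===== LEMMAS AND PROOFS =====

-- replace with a one-char pattern and one-char replacement is a per-character map
theorem replace_go_single (c0 d : Char) :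
    ∀ (fuel : Nat) (l acc : List Char), l.length ≤ fuel →
      PySem.Chars.replace.go [c0] [d] fuel l acc
        = acc.reverse ++ l.map (fun c => if c = c0 then d else c) := by
  intro fuel
  induction fuel with
  | zero =>
    intro l acc h
    have : l = [] := List.eq_nil_of_length_eq_zero (Nat.le_zero.mp h)
    subst this
    simp [PySem.Chars.replace.go]
  | succ n ih =>
    intro l acc h
    cases l with
    | nil => simp [PySem.Chars.replace.go]
    | cons c t =>
      have ht : t.length ≤ n := by simp at h; omega
      by_cases hc : c = c0
      · subst hc
        have hpre : List.isPrefixOf [c] (c :: t) = true := by simp [List.isPrefixOf]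
        rw [PySem.Chars.replace.go, if_pos hpre]
        simp only [List.length_cons, List.length_nil, Nat.zero_add, List.drop_succ_cons,
          List.drop_zero, List.reverse_cons, List.reverse_nil, List.nil_append]
        rw [ih t ([d] ++ acc) ht]
        simp
      · have hpre : List.isPrefixOf [c0] (c :: t) = false := by
          simp [List.isPrefixOf]
          intro hh; exact hc hh.symm
        rw [PySem.Chars.replace.go, if_neg (by simp [hpre])]
        rw [ih t (c :: acc) ht]
        simp [hc]

theorem replace_single (l : List Char) (c0 d : Char) :
    PySem.Chars.replace l [c0] [d] = l.map (fun c => if c = c0 then d else c) := by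
  rw [PySem.Chars.replace]
  rw [if_neg (by simp)]
  simpa using replace_go_single c0 d l.length l [] le_rfl

-- A's concatenation loop is a map
theorem foldl_append_map :
    ∀ (l acc : List Char),
      l.foldl (fun acc c => if 32 ≤ c.toNat ∧ c.toNat ≤ 126 then acc ++ [c] else acc ++ [' ']) acc
        = acc ++ l.map (fun c => if 32 ≤ c.toNat ∧ c.toNat ≤ 126 then c else ' ') := by
  intro l
  induction l with
  | nil => simp
  | cons c t ih =>
    intro acc
    simp only [List.foldl_cons, List.map_cons]
    by_cases h : 32 ≤ c.toNat ∧ c.toNat ≤ 126 <;> simp [h, ih]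

theorem char_eq_of_toNat {c d : Char} (h : c.toNat = d.toNat) : c = d := by
  apply Char.ext_iff.mpr
  exact UInt32.toNat_inj.mp (by simpa using h)

-- the sanitised char is whitespace exactly when the original is not keepable
theorem isspace_sanitized (c : Char) :
    PySem.Chars.isspace (if 32 ≤ c.toNat ∧ c.toNat ≤ 126 then c else ' ') = !pvKeep c := by
  by_cases h : 32 ≤ c.toNat ∧ c.toNat ≤ 126
  · rw [if_pos h]
    rw [Bool.eq_iff_iff]
    simp only [PySem.Chars.isspace, pvKeep, Bool.or_eq_true, Bool.and_eq_true,
      Bool.not_eq_true', Bool.and_eq_false_iff, decide_eq_true_eq, decide_eq_false_iff_not]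
    omega
  · rw [if_neg h]
    have : (!pvKeep c) = true := by
      simp only [pvKeep, Bool.not_eq_true', Bool.and_eq_false_iff, decide_eq_false_iff_not]
      omega
    rw [this]; decide

-- strip of the sanitised string = sanitise of the window between the outermost keepable chars
theorem strip_map_sanitize (l : List Char) :
    PySem.Chars.strip (l.map (fun c => if 32 ≤ c.toNat ∧ c.toNat ≤ 126 then c else ' '))
      = (((l.dropWhile (fun c => !pvKeep c)).reverse.dropWhile (fun c => !pvKeep c)).reverse.map
          (fun c => if 32 ≤ c.toNat ∧ c.toNat ≤ 126 then c else ' ')) := by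
  have hp : (PySem.Chars.isspace ∘ fun c => if 32 ≤ c.toNat ∧ c.toNat ≤ 126 then c else ' ')
      = fun c => !pvKeep c := by
    funext c; exact isspace_sanitized c
  unfold PySem.Chars.strip PySem.Chars.lstrip PySem.Chars.rstrip
  rw [List.dropWhile_map, hp, ← List.map_reverse, List.dropWhile_map, hp, ← List.map_reverse]

theorem strip_congr {l1 l2 : List Char} (h : l1 = l2) :
    PySem.Str.strip (String.ofList l1) = PySem.Str.strip (String.ofList l2) := by rw [h]

-- ===== VERDICT (by name: the statement is the Claim_ definition above) =====
theorem sanitize_lcd_text_spec : Claim_equal_sanitize_lcd_text := by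
  intro text hdom
  unfold Spec_sanitize_lcd_text sanitize_lcd_text sanitize_lcd_text_alt
  by_cases he : text = ""
  · simp [he]
  · rw [if_neg he, if_neg he]
    have hA :
        (PySem.Str.replace (PySem.Str.replace (PySem.Str.replace text "\n" " ") "\r" " ") "\t" " ").toList.foldl
            (fun acc c => if 32 ≤ c.toNat ∧ c.toNat ≤ 126 then acc ++ [c] else acc ++ [' ']) []
          = text.toList.map (fun c => if 32 ≤ c.toNat ∧ c.toNat ≤ 126 then c else ' ') := by
      rw [foldl_append_map, List.nil_append]
      rw [show ("\n" : String) = String.ofList ['\n'] from rfl,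
          show ("\r" : String) = String.ofList ['\r'] from rfl,
          show ("\t" : String) = String.ofList ['\t'] from rfl,
          show (" " : String) = String.ofList [' '] from rfl]
      rw [PySem.Str.toList_replace, PySem.Str.toList_replace, PySem.Str.toList_replace]
      simp only [String.toList_ofList]
      rw [replace_single, replace_single, replace_single]
      simp only [List.map_map]
      apply List.map_congr_left
      intro c hc
      have hdc : pvDomChar c = true := List.all_eq_true.mp hdom c hc
      simp only [pvDomChar, Bool.or_eq_true, Bool.and_eq_true, decide_eq_true_eq, beq_iff_eq] at hdc
      simp only [Function.comp]
      rcases hdc with ((⟨h1, h2⟩ | h9) | h10) | h13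
      · have hn : c ≠ '\n' := by intro h; subst h; simp at h1
        have hr : c ≠ '\r' := by intro h; subst h; simp at h1
        have htb : c ≠ '\t' := by intro h; subst h; simp at h1
        simp [hn, hr, htb, h1, h2]
      · have : c = '\t' := char_eq_of_toNat (by rw [h9]; rfl)
        subst this; decide
      · have : c = '\n' := char_eq_of_toNat (by rw [h10]; rfl)
        subst this; decide
      · have : c = '\r' := char_eq_of_toNat (by rw [h13]; rfl)
        subst this; decide
    rw [strip_congr hA]
    calc PySem.Str.strip (String.ofList (text.toList.map (fun c => if 32 ≤ c.toNat ∧ c.toNat ≤ 126 then c else ' ')))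
        = String.ofList (PySem.Str.strip (String.ofList (text.toList.map (fun c => if 32 ≤ c.toNat ∧ c.toNat ≤ 126 then c else ' ')))).toList := by rw [String.ofList_toList]
      _ = _ := by
        rw [PySem.Str.toList_strip]
        simp only [String.toList_ofList]
        rw [strip_map_sanitize]
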